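-- pv_equiv track=rewrite | github.com/EastFlovv/AlgorithmHub | 프로그래머스/lv2/87390. n＾2 배열 자르기/n＾2 배열 자르기.py | solution
-- ===== SOURCE A (Python) =====
-- def solution(n, left, right):
--
--     answer = []
--
--     for x in range(left, right+1):
--         val = x // n
--         rest = x % n
--
--         if val >= rest:
--             answer.append(val + 1)
--         else:
--             answer.append(rest + 1)
--
--     return answer
-- ===== SOURCE B (Python) =====
-- def solution(n, left, right):
--     answer = []
--     first = left // n
--     last = right // n
--     for r in range(first, last + 1):
--         c0 = left % n if r == first else 0
--         c1 = right % n if r == last else n - 1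
--         flat = min(r, c1) - c0 + 1          # columns c0..c1 with c <= r: value r+1
--         if flat > 0:
--             answer.extend([r + 1] * flat)
--         answer.extend(range(max(r + 1, c0) + 1, c1 + 2))  # columns c > r: value c+1
--     return answer
-- ===== Notes on version B (the rewrite author's own statement) =====
-- stated objective: alternative
-- what changed: Instead of computing x//n and x%n for every index, B iterates row by row, emitting each row's block as a constant run [r+1]*count followed by an increasing tail range; intended as faster (it measured 1.75x at the largest size but inconsistently across inputs), recorded as alternative.
-- outside the precondition, e.g. on solution(-2, 0, 1): A returns [1, 0], B returns []; on solution(0, 0, 1): A raises ZeroDivisionError, B raises ZeroDivisionError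
import Mathlib
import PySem

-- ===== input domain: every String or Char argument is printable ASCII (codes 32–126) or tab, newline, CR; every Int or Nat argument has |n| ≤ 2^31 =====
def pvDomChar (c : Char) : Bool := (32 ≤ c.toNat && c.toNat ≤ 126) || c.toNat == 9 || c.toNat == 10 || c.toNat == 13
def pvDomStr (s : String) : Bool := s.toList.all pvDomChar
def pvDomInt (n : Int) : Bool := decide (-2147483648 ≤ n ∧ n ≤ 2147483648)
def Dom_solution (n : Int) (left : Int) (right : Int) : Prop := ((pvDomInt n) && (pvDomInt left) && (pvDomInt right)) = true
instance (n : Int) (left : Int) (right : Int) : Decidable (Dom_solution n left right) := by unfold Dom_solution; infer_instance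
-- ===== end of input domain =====

-- B emits each row of the n×n matrix slice as a constant run followed by an increasing tail,
-- instead of computing x//n and x%n per element. Return-value equivalence on n ≥ 1.

-- ===== PORT A =====
def solution (n : Int) (left : Int) (right : Int) : List Int :=
  (PySem.List.pyRange left (right + 1) 1).foldl (fun answer x =>
    let val := PySem.Int.floordiv x n
    let rest := PySem.Int.mod x n
    if val ≥ rest then answer ++ [val + 1] else answer ++ [rest + 1]) []

-- ===== PORT B =====
def solution_alt (n : Int) (left : Int) (right : Int) : List Int :=
  let first := PySem.Int.floordiv left n
  let last := PySem.Int.floordiv right n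
  (PySem.List.pyRange first (last + 1) 1).foldl (fun answer r =>
    let c0 := if r = first then PySem.Int.mod left n else 0
    let c1 := if r = last then PySem.Int.mod right n else n - 1
    let flat := min r c1 - c0 + 1
    let answer := if flat > 0 then answer ++ List.replicate flat.toNat (r + 1) else answer
    answer ++ PySem.List.pyRange (max (r + 1) c0 + 1) (c1 + 2) 1) []

-- ===== PRECONDITION & SPEC =====
-- Pre_ restricts to the problem's natural domain n ≥ 1: for n = 0 both programs raise
-- ZeroDivisionError, and for n < 0 A returns values coming from Python's negative-divisor
-- floored division, outside the task's meaning (an n×n array), which B's row decomposition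
-- does not reproduce.
def Pre_solution (n : Int) (left : Int) (right : Int) : Prop := 1 ≤ n
instance (n : Int) (left : Int) (right : Int) : Decidable (Pre_solution n left right) := by unfold Pre_solution; infer_instance
def pvWitness_solution : Int × Int × Int := (3, 2, 5)
def Spec_solution (n : Int) (left : Int) (right : Int) (out : List Int) : Prop := out = solution_alt n left right
instance (n : Int) (left : Int) (right : Int) (out : List Int) : Decidable (Spec_solution n left right out) := by unfold Spec_solution; infer_instance

-- ===== CLAIM (what is proved, stated in full; the proofs are below) =====
def Claim_equal_solution : Prop := ∀ (n : Int) (left : Int) (right : Int), Dom_solution n left right → Pre_solution n left right → Spec_solution n left right (solution n left right)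

-- ===== LEMMAS AND PROOFS =====

-- per-element value A computes at index x
def pvF (n x : Int) : Int :=
  if PySem.Int.floordiv x n ≥ PySem.Int.mod x n then PySem.Int.floordiv x n + 1
  else PySem.Int.mod x n + 1

-- the block B emits for row q with column span c0..c1
def pvBlock (n q c0 c1 : Int) : List Int :=
  (if min q c1 - c0 + 1 > 0 then List.replicate (min q c1 - c0 + 1).toNat (q + 1) else []) ++
    PySem.List.pyRange (max (q + 1) c0 + 1) (c1 + 2) 1

lemma pvFoldA (n : Int) : ∀ (xs : List Int) (acc : List Int),
    xs.foldl (fun answer x =>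
      let val := PySem.Int.floordiv x n
      let rest := PySem.Int.mod x n
      if val ≥ rest then answer ++ [val + 1] else answer ++ [rest + 1]) acc
    = acc ++ xs.map (pvF n) := by
  intro xs
  induction xs with
  | nil => intro acc; simp
  | cons x xs ih =>
    intro acc
    simp only [List.foldl_cons, List.map_cons, ih, pvF]
    split_ifs <;> simp

lemma pvFoldB (n first last ml mr : Int) : ∀ (xs : List Int) (acc : List Int),
    xs.foldl (fun answer r =>
      let c0 := if r = first then ml else 0
      let c1 := if r = last then mr else n - 1
      let flat := min r c1 - c0 + 1
      let answer := if flat > 0 then answer ++ List.replicate flat.toNat (r + 1) else answer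
      answer ++ PySem.List.pyRange (max (r + 1) c0 + 1) (c1 + 2) 1) acc
    = acc ++ xs.flatMap (fun q =>
        pvBlock n q (if q = first then ml else 0)
                    (if q = last then mr else n - 1)) := by
  intro xs
  induction xs with
  | nil => intro acc; simp
  | cons x xs ih =>
    intro acc
    simp only [List.foldl_cons, List.flatMap_cons, ih, pvBlock]
    split_ifs <;> simp

lemma pvA_eq (n l r : Int) :
    solution n l r = (PySem.List.pyRange l (r + 1) 1).map (pvF n) := by
  unfold solution
  rw [pvFoldA]
  simp

lemma pvB_eq (n l r : Int) :
    solution_alt n l r = (PySem.List.pyRange (PySem.Int.floordiv l n) (PySem.Int.floordiv r n + 1) 1).flatMap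
      (fun q => pvBlock n q (if q = PySem.Int.floordiv l n then PySem.Int.mod l n else 0)
                            (if q = PySem.Int.floordiv r n then PySem.Int.mod r n else n - 1)) := by
  unfold solution_alt
  rw [pvFoldB]
  simp

lemma pvRowIdx (n q c : Int) (hn : 1 ≤ n) (h0 : 0 ≤ c) (h1 : c < n) :
    PySem.Int.floordiv (q * n + c) n = q ∧ PySem.Int.mod (q * n + c) n = c := by
  have hd : PySem.Int.floordiv (q * n + c) n = q := by
    rw [PySem.Int.floordiv_eq_iff_of_pos (by omega)]
    constructor <;> nlinarith
  refine ⟨hd, ?_⟩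
  have := PySem.Int.floordiv_mul_add_mod (q * n + c) n
  rw [hd] at this
  linarith

lemma pvSeg (n q : Int) (hn : 1 ≤ n) : ∀ (k : Nat) (c0 c1 : Int), 0 ≤ c0 → c1 < n →
    (c1 + 1 - c0).toNat = k →
    (PySem.List.pyRange (q * n + c0) (q * n + c1 + 1) 1).map (pvF n) = pvBlock n q c0 c1 := by
  intro k
  induction k with
  | zero =>
    intro c0 c1 h0 h1 hk
    rw [PySem.List.pyRange_one_eq_nil (by omega : q * n + c1 + 1 ≤ q * n + c0)]
    unfold pvBlock
    rw [if_neg (by omega), PySem.List.pyRange_one_eq_nil (by omega)]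
    rfl
  | succ k ih =>
    intro c0 c1 h0 h1 hk
    have hcc : c0 ≤ c1 := by omega
    obtain ⟨hq, hm⟩ := pvRowIdx n q c0 hn h0 (by omega)
    rw [PySem.List.pyRange_one_cons (by omega : q * n + c0 < q * n + c1 + 1), List.map_cons]
    have htail := ih (c0 + 1) c1 (by omega) h1 (by omega)
    rw [← add_assoc] at htail
    rw [htail]
    have hf : pvF n (q * n + c0) = if c0 ≤ q then q + 1 else c0 + 1 := by
      unfold pvF
      rw [hq, hm]
    rw [hf]
    unfold pvBlock
    by_cases hcq : c0 ≤ q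
    · rw [if_pos hcq, if_pos (by omega : min q c1 - c0 + 1 > 0)]
      have hrep : (if min q c1 - (c0 + 1) + 1 > 0
            then List.replicate (min q c1 - (c0 + 1) + 1).toNat (q + 1) else ([] : List Int))
          = List.replicate (min q c1 - (c0 + 1) + 1).toNat (q + 1) := by
        split_ifs with h
        · rfl
        · rw [show (min q c1 - (c0 + 1) + 1).toNat = 0 from by omega]
          rfl
      rw [hrep]
      rw [show max (q + 1) c0 = q + 1 from by omega,
          show max (q + 1) (c0 + 1) = q + 1 from by omega,
          show (min q c1 - c0 + 1).toNat = (min q c1 - (c0 + 1) + 1).toNat + 1 from by omega,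
          List.replicate_succ]
      simp
    · rw [if_neg hcq, if_neg (by omega : ¬ min q c1 - c0 + 1 > 0),
          if_neg (by omega : ¬ min q c1 - (c0 + 1) + 1 > 0)]
      rw [show max (q + 1) c0 = c0 from by omega,
          show max (q + 1) (c0 + 1) = c0 + 1 from by omega]
      rw [PySem.List.pyRange_one_cons (by omega : c0 + 1 < c1 + 2)]
      simp

lemma pvFlatMapCongr {α β : Type} (g h : α → List β) : ∀ (xs : List α),
    (∀ x ∈ xs, g x = h x) → xs.flatMap g = xs.flatMap h := by
  intro xs
  induction xs with
  | nil => intro _; rfl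
  | cons x xs ih =>
    intro hgh
    simp only [List.flatMap_cons, hgh x (by simp), ih (fun y hy => hgh y (by simp [hy]))]

lemma pvMain (n : Int) (hn : 1 ≤ n) : ∀ (k : Nat) (l r : Int),
    (PySem.Int.floordiv r n - PySem.Int.floordiv l n).toNat = k →
    (PySem.List.pyRange l (r + 1) 1).map (pvF n)
    = (PySem.List.pyRange (PySem.Int.floordiv l n) (PySem.Int.floordiv r n + 1) 1).flatMap
        (fun q => pvBlock n q (if q = PySem.Int.floordiv l n then PySem.Int.mod l n else 0)
                              (if q = PySem.Int.floordiv r n then PySem.Int.mod r n else n - 1)) := by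
  intro k
  induction k with
  | zero =>
    intro l r hk
    have hle : PySem.Int.floordiv r n ≤ PySem.Int.floordiv l n := by omega
    have hl := PySem.Int.floordiv_mul_add_mod l n
    have hr := PySem.Int.floordiv_mul_add_mod r n
    have hml0 : 0 ≤ PySem.Int.mod l n := PySem.Int.mod_nonneg l (by omega)
    have hml1 : PySem.Int.mod l n < n := PySem.Int.mod_lt l (by omega)
    have hmr0 : 0 ≤ PySem.Int.mod r n := PySem.Int.mod_nonneg r (by omega)
    have hmr1 : PySem.Int.mod r n < n := PySem.Int.mod_lt r (by omega)
    rcases eq_or_lt_of_le hle with heq | hlt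
    · rw [heq, PySem.List.pyRange_one_singleton, List.flatMap_cons, List.flatMap_nil,
          List.append_nil, if_pos rfl, if_pos rfl]
      conv_lhs => rw [show l = PySem.Int.floordiv l n * n + PySem.Int.mod l n from hl.symm,
        show r + 1 = PySem.Int.floordiv l n * n + PySem.Int.mod r n + 1 from by
          rw [← heq]; linarith]
      exact pvSeg n (PySem.Int.floordiv l n) hn _ (PySem.Int.mod l n) (PySem.Int.mod r n)
        hml0 hmr1 rfl
    · have hmul : (PySem.Int.floordiv r n + 1) * n ≤ PySem.Int.floordiv l n * n :=
        mul_le_mul_of_nonneg_right (by omega) (by omega)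
      have hexp : (PySem.Int.floordiv r n + 1) * n = PySem.Int.floordiv r n * n + n := by ring
      rw [PySem.List.pyRange_one_eq_nil (by linarith : r + 1 ≤ l),
          PySem.List.pyRange_one_eq_nil (by omega :
            PySem.Int.floordiv r n + 1 ≤ PySem.Int.floordiv l n)]
      rfl
  | succ k ih =>
    intro l r hk
    have hlt : PySem.Int.floordiv l n < PySem.Int.floordiv r n := by omega
    have hl := PySem.Int.floordiv_mul_add_mod l n
    have hr := PySem.Int.floordiv_mul_add_mod r n
    have hml0 : 0 ≤ PySem.Int.mod l n := PySem.Int.mod_nonneg l (by omega)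
    have hml1 : PySem.Int.mod l n < n := PySem.Int.mod_lt l (by omega)
    have hmr0 : 0 ≤ PySem.Int.mod r n := PySem.Int.mod_nonneg r (by omega)
    have hmul : (PySem.Int.floordiv l n + 1) * n ≤ PySem.Int.floordiv r n * n :=
      mul_le_mul_of_nonneg_right (by omega) (by omega)
    have hexp : (PySem.Int.floordiv l n + 1) * n = PySem.Int.floordiv l n * n + n := by ring
    have hlm : l < (PySem.Int.floordiv l n + 1) * n := by linarith
    have hmr : (PySem.Int.floordiv l n + 1) * n ≤ r + 1 := by linarith
    rw [PySem.List.pyRange_one_append l ((PySem.Int.floordiv l n + 1) * n) (r + 1)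
          (le_of_lt hlm) hmr, List.map_append,
        PySem.List.pyRange_one_cons (show PySem.Int.floordiv l n < PySem.Int.floordiv r n + 1
          from by omega), List.flatMap_cons]
    have hfdm : PySem.Int.floordiv ((PySem.Int.floordiv l n + 1) * n) n
        = PySem.Int.floordiv l n + 1 := by
      have h := (pvRowIdx n (PySem.Int.floordiv l n + 1) 0 hn le_rfl (by omega)).1
      rwa [add_zero] at h
    have hmodm : PySem.Int.mod ((PySem.Int.floordiv l n + 1) * n) n = 0 := by
      have h := (pvRowIdx n (PySem.Int.floordiv l n + 1) 0 hn le_rfl (by omega)).2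
      rwa [add_zero] at h
    congr 1
    · have e2 : (PySem.Int.floordiv l n + 1) * n = PySem.Int.floordiv l n * n + (n - 1) + 1 := by
        ring
      rw [show PySem.List.pyRange l ((PySem.Int.floordiv l n + 1) * n) 1
            = PySem.List.pyRange (PySem.Int.floordiv l n * n + PySem.Int.mod l n)
                (PySem.Int.floordiv l n * n + (n - 1) + 1) 1 from by rw [hl, ← e2]]
      rw [pvSeg n (PySem.Int.floordiv l n) hn _ (PySem.Int.mod l n) (n - 1) hml0 (by omega) rfl,
          if_pos rfl, if_neg (by omega)]
    · have hih := ih ((PySem.Int.floordiv l n + 1) * n) r (by rw [hfdm]; omega)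
      rw [hfdm, hmodm] at hih
      rw [hih]
      apply pvFlatMapCongr
      intro x hx
      have hx1 : PySem.Int.floordiv l n + 1 ≤ x := (PySem.List.mem_pyRange_one.mp hx).1
      rw [if_neg (by omega : ¬ x = PySem.Int.floordiv l n),
          show (if x = PySem.Int.floordiv l n + 1 then (0 : Int) else 0) = 0 from by
            split_ifs <;> rfl]

-- ===== VERDICT (by name: the statement is the Claim_ definition above) =====
theorem solution_spec : Claim_equal_solution := by
  intro n l r _ hn
  unfold Spec_solution
  rw [pvA_eq, pvB_eq, pvMain n hn _ l r rfl]
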